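-- pv_equiv track=rewrite | github.com/Enjef/Algo | 2100 - 2199/2169 - Count Operations to Obtain Zero/2169 - Count Operations to Obtain Zero.py | countOperations_best_speed
-- ===== SOURCE A (Python) =====
-- def countOperations_best_speed(num1: int, num2: int) -> int:
--     ops = 0
--     while num1 != 0 and num2 != 0:
--         if num1 == num2:
--             ops += 1
--             break
--         elif num1 < num2:
--             ops += (num2 // num1)
--             num2 = num2 % num1
--         else:
--             ops += (num1 // num2)
--             num1 = num1 % num2
--     return ops
-- ===== SOURCE B (Python) =====
-- def countOperations_best_speed(num1: int, num2: int) -> int: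
--     # Recursive gcd-style decomposition: sum of Euclidean quotients.
--     if num1 == 0 or num2 == 0:
--         return 0
--     lo, hi = (num1, num2) if num1 <= num2 else (num2, num1)
--     return hi // lo + countOperations_best_speed(lo, hi % lo)
-- ===== Notes on version B (the rewrite author's own statement) =====
-- stated objective: alternative
-- what changed: Replaces A's accumulating while-loop (with a special num1==num2 break) by a recursion over the gcd recurrence that returns the sum of Euclidean quotients, with no equality special case.
-- outside the precondition, e.g. on countOperations_best_speed(-1, 2): A returns -2, B returns -2; on countOperations_best_speed(2, -3): A does not finish within the time limit, B raises RecursionError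
import Mathlib
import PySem

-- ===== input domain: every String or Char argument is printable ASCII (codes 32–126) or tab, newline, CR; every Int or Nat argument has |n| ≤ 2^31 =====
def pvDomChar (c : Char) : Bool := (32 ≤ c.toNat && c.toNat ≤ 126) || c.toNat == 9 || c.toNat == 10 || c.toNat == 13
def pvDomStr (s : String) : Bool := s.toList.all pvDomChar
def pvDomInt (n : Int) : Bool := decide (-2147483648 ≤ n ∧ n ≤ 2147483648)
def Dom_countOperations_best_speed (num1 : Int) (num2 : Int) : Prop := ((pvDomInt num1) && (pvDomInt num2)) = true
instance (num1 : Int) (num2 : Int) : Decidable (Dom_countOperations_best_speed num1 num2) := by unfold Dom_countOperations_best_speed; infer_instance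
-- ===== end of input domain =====

-- B replaces A's accumulating while-loop by a recursion summing the Euclidean quotients (alternative decomposition, same cost).

-- ===== PORT A =====
-- A's while-loop as a fuel-guarded tail recursion over the same state (num1, num2, ops);
-- the fuel only makes the function total and is sufficient on every input in Pre_.
def pvGoA (fuel : Nat) (num1 num2 ops : Int) : Int :=
  match fuel with
  | 0 => ops
  | f + 1 =>
    if num1 ≠ 0 ∧ num2 ≠ 0 then
      if num1 = num2 then ops + 1
      else if num1 < num2 then
        pvGoA f num1 (PySem.Int.mod num2 num1) (ops + PySem.Int.floordiv num2 num1)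
      else
        pvGoA f (PySem.Int.mod num1 num2) num2 (ops + PySem.Int.floordiv num1 num2)
    else ops

def countOperations_best_speed (num1 : Int) (num2 : Int) : Int :=
  pvGoA (num1.natAbs + num2.natAbs + 1) num1 num2 0

-- ===== PORT B =====
-- B's recursion, fuel-guarded for totality only (sufficient on every input in Pre_).
def pvGoB (fuel : Nat) (num1 num2 : Int) : Int :=
  match fuel with
  | 0 => 0
  | f + 1 =>
    if num1 = 0 ∨ num2 = 0 then 0
    else
      let lo := if num1 ≤ num2 then num1 else num2
      let hi := if num1 ≤ num2 then num2 else num1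
      PySem.Int.floordiv hi lo + pvGoB f lo (PySem.Int.mod hi lo)

def countOperations_best_speed_alt (num1 : Int) (num2 : Int) : Int :=
  pvGoB (num1.natAbs + num2.natAbs + 1) num1 num2

-- ===== PRECONDITION & SPEC =====
-- Pre_ excludes inputs with a negative argument: those lie outside the problem's natural
-- nonnegative domain, and there A diverges on most pairs and returns negative "operation
-- counts" on the rest.
def Pre_countOperations_best_speed (num1 : Int) (num2 : Int) : Prop := 0 ≤ num1 ∧ 0 ≤ num2
instance (num1 : Int) (num2 : Int) : Decidable (Pre_countOperations_best_speed num1 num2) := by unfold Pre_countOperations_best_speed; infer_instance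
def pvWitness_countOperations_best_speed : Int × Int := (6, 4)

def Spec_countOperations_best_speed (num1 : Int) (num2 : Int) (out : Int) : Prop := out = countOperations_best_speed_alt num1 num2
instance (num1 : Int) (num2 : Int) (out : Int) : Decidable (Spec_countOperations_best_speed num1 num2 out) := by unfold Spec_countOperations_best_speed; infer_instance

-- ===== CLAIM (what is proved, stated in full; the proofs are below) =====
def Claim_equal_countOperations_best_speed : Prop := ∀ (num1 : Int) (num2 : Int), Dom_countOperations_best_speed num1 num2 → Pre_countOperations_best_speed num1 num2 → Spec_countOperations_best_speed num1 num2 (countOperations_best_speed num1 num2)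

-- ===== LEMMAS AND PROOFS =====


-- B's lo/hi normalisation makes one step of pvGoB symmetric in its two arguments.
theorem pvGoB_comm (f : Nat) (a b : Int) : pvGoB f a b = pvGoB f b a := by
  cases f with
  | zero => rfl
  | succ f' =>
    simp only [pvGoB]
    by_cases hab : a = b
    · subst hab; rfl
    · by_cases h : a ≤ b
      · have h' : ¬ b ≤ a := by omega
        simp [h, h', or_comm]
      · have h' : b ≤ a := by omega
        simp [h, h', or_comm]

-- Core invariant: with enough fuel, A's loop from accumulator `ops` returns `ops` plus B's value.
theorem pvGoA_eq_goB (fuel : Nat) :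
    ∀ (a b ops : Int), 0 ≤ a → 0 ≤ b → a.natAbs + b.natAbs < fuel →
      pvGoA fuel a b ops = ops + pvGoB fuel a b := by
  induction fuel with
  | zero => intro a b ops _ _ h; omega
  | succ f ih =>
    intro a b ops ha hb hfuel
    by_cases hz : a ≠ 0 ∧ b ≠ 0
    · obtain ⟨ha0, hb0⟩ := hz
      have hz' : ¬ (a = 0 ∨ b = 0) := by tauto
      simp only [pvGoA, pvGoB]
      rw [if_pos (show a ≠ 0 ∧ b ≠ 0 from ⟨ha0, hb0⟩), if_neg hz']
      by_cases heq : a = b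
      · -- A returns ops + 1; B: quotient 1, second argument becomes 0
        subst heq
        have hpos : 0 < a := lt_of_le_of_ne ha (Ne.symm ha0)
        rw [if_pos rfl, if_pos (le_refl a)]
        have hd : PySem.Int.floordiv a a = 1 := by
          rw [PySem.Int.floordiv_eq_ediv_of_pos hpos, Int.ediv_self ha0]
        have hm : PySem.Int.mod a a = 0 := by
          rw [PySem.Int.mod_eq_emod_of_pos hpos, Int.emod_self]
        rw [hd, hm]
        cases f with
        | zero => simp [pvGoB]
        | succ f' => simp [pvGoB]
      · rw [if_neg heq]
        by_cases hlt : a < b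
        · -- A: (a, b % a, ops + b // a);  B: lo = a, hi = b
          have hpos : 0 < a := lt_of_le_of_ne ha (Ne.symm ha0)
          have hmn := PySem.Int.mod_nonneg b hpos
          have hml := PySem.Int.mod_lt b hpos
          have hfu : a.natAbs + (PySem.Int.mod b a).natAbs < f := by omega
          rw [if_pos hlt]
          simp only [if_pos (le_of_lt hlt)]
          rw [ih a (PySem.Int.mod b a) _ ha hmn hfu]
          ring
        · -- A: (a % b, b, ops + a // b);  B: lo = b, hi = a
          have hba : b < a := by omega
          have hpos : 0 < b := lt_of_le_of_ne hb (Ne.symm hb0)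
          have hmn := PySem.Int.mod_nonneg a hpos
          have hml := PySem.Int.mod_lt a hpos
          have hfu : (PySem.Int.mod a b).natAbs + b.natAbs < f := by omega
          rw [if_neg hlt]
          simp only [if_neg (show ¬ a ≤ b by omega)]
          rw [ih (PySem.Int.mod a b) b _ hmn hb hfu, pvGoB_comm f b (PySem.Int.mod a b)]
          ring
    · -- a = 0 or b = 0: both return the accumulator / 0
      have hz' : a = 0 ∨ b = 0 := by tauto
      simp [pvGoA, pvGoB, hz, hz']

theorem countOperations_best_speed_spec : Claim_equal_countOperations_best_speed := by
  intro num1 num2 _ hpre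
  obtain ⟨h1, h2⟩ := hpre
  unfold Spec_countOperations_best_speed countOperations_best_speed countOperations_best_speed_alt
  rw [pvGoA_eq_goB _ num1 num2 0 h1 h2 (by omega)]
  ring
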